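-- pv_equiv track=rewrite | github.com/smit-04/python | Lab 7/4.py | remove_sub
-- ===== SOURCE A (Python) =====
-- def remove_sub(s, rem):
--     l1 = len(rem)
--     l2 = len(s)
--     for i in range(l2 - l1 + 1):
--         f = True
--         for j in range(l1):
--             if s[i + j] != rem[j]:
--                 f = False
--                 break
--         if f:
--             return s[:i] + s[i + l1:]
--     return s
-- ===== SOURCE B (Python) =====
-- def remove_sub(s, rem):
--     i = s.find(rem)
--     if i == -1:
--         return s
--     return s[:i] + s[i + len(rem):]
-- ===== Notes on version B (the rewrite author's own statement) =====
-- stated objective: idiomatic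
-- what changed: Replaces A's hand-rolled nested index loops (outer candidate position, inner char-by-char flag check with break) by a single str.find call for the first occurrence followed by two slices.
import Mathlib
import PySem

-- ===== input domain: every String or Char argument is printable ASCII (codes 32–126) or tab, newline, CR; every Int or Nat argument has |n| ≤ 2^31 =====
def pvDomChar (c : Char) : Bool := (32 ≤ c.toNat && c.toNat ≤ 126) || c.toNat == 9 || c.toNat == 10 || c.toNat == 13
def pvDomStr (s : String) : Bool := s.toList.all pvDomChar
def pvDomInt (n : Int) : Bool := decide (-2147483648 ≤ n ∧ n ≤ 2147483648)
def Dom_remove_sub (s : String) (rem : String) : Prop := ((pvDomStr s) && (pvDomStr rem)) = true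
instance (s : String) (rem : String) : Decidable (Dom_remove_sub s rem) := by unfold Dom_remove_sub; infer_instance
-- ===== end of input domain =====

-- B replaces A's hand-rolled nested search loops by a single str.find plus two slices (idiomatic; same return value).

-- ===== PORT A =====
-- inner 'for j in range(l1)' with the flag f and break: returns the final value of f
def pvInnerA (s rem : List Char) (i : Int) : List Int → Bool
  | [] => true
  | j :: js =>
    if PySem.List.pyGet? s (i + j) ≠ PySem.List.pyGet? rem j then false
    else pvInnerA s rem i js

-- outer 'for i in range(l2 - l1 + 1)' with the early return
def pvOuterA (s rem : List Char) (l1 : Int) : List Int → List Char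
  | [] => s
  | i :: is =>
    if pvInnerA s rem i (PySem.List.pyRange 0 l1 1) then
      PySem.List.slice s none (some i) ++ PySem.List.slice s (some (i + l1)) none
    else pvOuterA s rem l1 is

def remove_sub (s : String) (rem : String) : String :=
  let l1 : Int := PySem.Str.len rem
  let l2 : Int := PySem.Str.len s
  String.ofList (pvOuterA s.toList rem.toList l1 (PySem.List.pyRange 0 (l2 - l1 + 1) 1))

-- ===== PORT B =====
def remove_sub_alt (s : String) (rem : String) : String :=
  let i : Int := PySem.Str.find s rem
  if i = -1 then s
  else
    String.ofList (PySem.List.slice s.toList none (some i) ++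
               PySem.List.slice s.toList (some (i + (PySem.Str.len rem : Int))) none)

-- ===== PRECONDITION & SPEC =====
def Spec_remove_sub (s : String) (rem : String) (out : String) : Prop := out = remove_sub_alt s rem
instance (s : String) (rem : String) (out : String) : Decidable (Spec_remove_sub s rem out) := by unfold Spec_remove_sub; infer_instance

-- ===== CLAIM (what is proved, stated in full; the proofs are below) =====
def Claim_equal_remove_sub : Prop := ∀ (s : String) (rem : String), Dom_remove_sub s rem → Spec_remove_sub s rem (remove_sub s rem)

-- ===== LEMMAS AND PROOFS =====

-- A's inner loop over range(j, l1) computes isPrefixOf of the corresponding tails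
lemma pvInnerA_eq (s rem : List Char) (a : Nat) (n : Nat) :
    ∀ j : Nat, rem.length - j = n → j ≤ rem.length → a + rem.length ≤ s.length →
    pvInnerA s rem (a : Int) (PySem.List.pyRange (j : Int) (rem.length : Int) 1)
      = List.isPrefixOf (rem.drop j) (s.drop (a + j)) := by
  induction n with
  | zero =>
    intro j hn hj _
    have hje : j = rem.length := by omega
    subst hje
    rw [PySem.List.pyRange_one_eq_nil (by omega)]
    simp [pvInnerA]
  | succ n ih =>
    intro j hn hj hlen
    have hjlt : j < rem.length := by omega
    rw [PySem.List.pyRange_one_cons (by exact_mod_cast hjlt)]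
    have hsj : a + j < s.length := by omega
    have h1 : PySem.List.pyGet? s ((a : Int) + (j : Int)) = some s[a + j] := by
      have : ((a : Int) + (j : Int)) = ((a + j : Nat) : Int) := by push_cast; ring
      rw [this, PySem.List.pyGet?_natCast, List.getElem?_eq_getElem hsj]
    have h2 : PySem.List.pyGet? rem ((j : Nat) : Int) = some rem[j] := by
      rw [PySem.List.pyGet?_natCast, List.getElem?_eq_getElem hjlt]
    have hdr : rem.drop j = rem[j] :: rem.drop (j + 1) := List.drop_eq_getElem_cons hjlt
    have hds : s.drop (a + j) = s[a + j] :: s.drop (a + j + 1) := List.drop_eq_getElem_cons hsj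
    rw [pvInnerA, h1, h2, hdr, hds]
    by_cases hc : s[a + j] = rem[j]
    · have hcast : (j : Int) + 1 = ((j + 1 : Nat) : Int) := by push_cast; ring
      rw [if_neg (by simp [hc]), hcast, ih (j + 1) (by omega) (by omega) hlen]
      have hadd : a + (j + 1) = a + j + 1 := by omega
      rw [hadd]
      simp [List.isPrefixOf, hc]
    · rw [if_pos (by simp [hc])]
      have hfalse : (rem[j] :: rem.drop (j + 1)).isPrefixOf (s[a + j] :: s.drop (a + j + 1)) = false := by
        simp only [List.isPrefixOf, Bool.and_eq_false_iff, beq_eq_false_iff_ne, ne_eq]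
        exact Or.inl (fun h => hc h.symm)
      rw [hfalse]

lemma pvInnerA_iff (s rem : List Char) (a : Nat) (hlen : a + rem.length ≤ s.length) :
    pvInnerA s rem (a : Int) (PySem.List.pyRange 0 (rem.length : Int) 1) = true
      ↔ rem <+: s.drop a := by
  have h := pvInnerA_eq s rem a rem.length 0 (by omega) (by omega) hlen
  simp only [Nat.cast_zero] at h
  rw [h]
  simp [List.isPrefixOf_iff_prefix]

-- if no candidate matches, the outer loop falls through and returns s
lemma pvOuterA_all_false (s rem : List Char) (l1 : Int) :
    ∀ idxs : List Int,
      (∀ i ∈ idxs, pvInnerA s rem i (PySem.List.pyRange 0 l1 1) = false) →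
      pvOuterA s rem l1 idxs = s := by
  intro idxs
  induction idxs with
  | nil => intro _; rfl
  | cons i is ih =>
    intro h
    rw [pvOuterA, h i (by simp), ih (fun x hx => h x (by simp [hx]))]
    simp

-- the outer loop stops at the first matching index k and returns the two slices there
lemma pvOuterA_reach (s rem : List Char) (k : Nat)
    (hk : k + rem.length ≤ s.length)
    (hpref : rem <+: s.drop k)
    (hmin : ∀ i, i < k → ¬ rem <+: s.drop i) :
    ∀ n a : Nat, k - a = n → a ≤ k →
    pvOuterA s rem (rem.length : Int)
        (PySem.List.pyRange (a : Int) ((s.length : Int) - (rem.length : Int) + 1) 1)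
      = PySem.List.slice s none (some (k : Int)) ++
        PySem.List.slice s (some ((k : Int) + (rem.length : Int))) none := by
  intro n
  induction n with
  | zero =>
    intro a hn ha
    have hak : a = k := by omega
    subst hak
    rw [PySem.List.pyRange_one_cons (by omega)]
    rw [pvOuterA, if_pos ((pvInnerA_iff s rem a hk).mpr hpref)]
  | succ n ih =>
    intro a hn ha
    have halt : a < k := by omega
    rw [PySem.List.pyRange_one_cons (by omega)]
    have hfalse : pvInnerA s rem (a : Int) (PySem.List.pyRange 0 (rem.length : Int) 1) = false := by
      have := hmin a halt
      have hiff := pvInnerA_iff s rem a (by omega)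
      cases hb : pvInnerA s rem (a : Int) (PySem.List.pyRange 0 (rem.length : Int) 1)
      · rfl
      · exact absurd (hiff.mp hb) this
    rw [pvOuterA, hfalse]
    simp only [Bool.false_eq_true, if_false]
    have hcast : (a : Int) + 1 = ((a + 1 : Nat) : Int) := by push_cast; ring
    rw [hcast, ih (a + 1) (by omega) (by omega)]

-- ===== VERDICT (by name: the statement is the Claim_ definition above) =====
theorem remove_sub_spec : Claim_equal_remove_sub := by
  intro s rem _
  unfold Spec_remove_sub remove_sub remove_sub_alt
  simp only [PySem.Str.len_eq, PySem.Str.find_eq]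
  set cs := s.toList with hcs
  set rs := rem.toList with hrs
  by_cases hF : PySem.Chars.find cs rs = -1
  · -- no occurrence: both return s
    rw [if_pos hF]
    have hnoinf : ¬ rs <:+: cs := (PySem.Chars.find_eq_neg_one_iff cs rs).mp hF
    rw [pvOuterA_all_false]
    · rw [hcs]; exact String.ofList_toList
    · intro i hi
      have hmem := (PySem.List.mem_pyRange_one.mp hi)
      have h0 : 0 ≤ i := hmem.1
      set a := i.toNat with hav
      have hia : i = (a : Int) := (Int.toNat_of_nonneg h0).symm
      have hbound : a + rs.length ≤ cs.length := by
        have := hmem.2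
        omega
      have hiff := pvInnerA_iff cs rs a hbound
      cases hb : pvInnerA cs rs i (PySem.List.pyRange 0 (rs.length : Int) 1)
      · rfl
      · rw [hia] at hb
        have hpre := hiff.mp hb
        exact absurd ((PySem.Chars.isIn_iff_infix rs cs).mp
          ((PySem.Chars.exists_prefix_drop_iff_isIn rs cs).mp ⟨a, hpre⟩)) hnoinf
  · -- first occurrence at k = find
    rw [if_neg hF]
    have h0 : 0 ≤ PySem.Chars.find cs rs := by
      have := PySem.Chars.neg_one_le_find cs rs
      omega
    obtain ⟨hpref, hmin⟩ := PySem.Chars.find_spec h0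
    set k := (PySem.Chars.find cs rs).toNat with hkv
    have hkc : PySem.Chars.find cs rs = (k : Int) := (Int.toNat_of_nonneg h0).symm
    have hkle : (k : Int) ≤ (cs.length : Int) := by
      rw [← hkc]; exact PySem.Chars.find_le_length cs rs
    have hklen : k + rs.length ≤ cs.length := by
      have hlp : rs.length ≤ (cs.drop k).length := hpref.length_le
      rw [List.length_drop] at hlp
      omega
    have hreach := pvOuterA_reach cs rs k hklen hpref hmin k 0 (by omega) (by omega)
    simp only [Nat.cast_zero] at hreach
    rw [hkc, hreach]
-- ===== END =====
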